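-- pv_equiv track=rewrite | github.com/huanghaodong1997/lc | Intuit/Ancestor.py | furthest_common_ancestor
-- ===== SOURCE A (Python) =====
-- from collections import defaultdict
-- from collections import deque
--
-- def furthest_common_ancestor(parents, x):
--     graph = defaultdict(list)
--     #indegree = defaultdict(int)
--     nodes = set()
--     for src, dst in parents:
--         nodes.add(src)
--         nodes.add(dst)
--         graph[dst].append(src)
--     def bfs(node):
--         res = node
--         q = deque([node])
--         while q:
--             node = q.popleft()
--             res = node
--             for parent in graph[node]:
--                 q.append(parent)
--         return res
--     ancestor = bfs(x)
--     return ancestor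
-- ===== SOURCE B (Python) =====
-- def furthest_common_ancestor(parents, x):
--     # Level-synchronous upward BFS: expand whole frontier levels at once
--     # (same order/duplicates as a node-by-node queue), remember the last
--     # element of the most recent non-empty level.
--     graph = {}
--     for src, dst in parents:
--         graph.setdefault(dst, []).append(src)
--     frontier = [x]
--     last = x
--     while frontier:
--         last = frontier[-1]
--         frontier = [p for node in frontier for p in graph.get(node, [])]
--     return last
-- ===== Notes on version B (the rewrite author's own statement) =====
-- stated objective: alternative
-- what changed: Replaces A's node-by-node deque BFS (popleft one node, append its parents) by a level-synchronous BFS that expands the whole frontier to the next level in one comprehension and keeps the last element of the most recent non-empty level; the unused 'nodes' set is dropped.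
import Mathlib
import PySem

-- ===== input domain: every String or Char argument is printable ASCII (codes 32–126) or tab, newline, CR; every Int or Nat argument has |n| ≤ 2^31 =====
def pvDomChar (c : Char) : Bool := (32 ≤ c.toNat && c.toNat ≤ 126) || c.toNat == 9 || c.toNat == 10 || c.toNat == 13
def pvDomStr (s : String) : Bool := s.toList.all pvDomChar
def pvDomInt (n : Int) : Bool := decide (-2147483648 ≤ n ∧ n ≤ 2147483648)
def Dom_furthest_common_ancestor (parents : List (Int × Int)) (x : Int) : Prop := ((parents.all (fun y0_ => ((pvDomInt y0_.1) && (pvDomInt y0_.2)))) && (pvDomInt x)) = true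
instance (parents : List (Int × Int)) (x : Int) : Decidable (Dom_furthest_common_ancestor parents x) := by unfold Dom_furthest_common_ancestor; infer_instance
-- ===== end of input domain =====

-- B replaces A's one-node-at-a-time deque BFS by a level-synchronous BFS (whole-frontier
-- expansion per step); equivalence of the RETURN value is proved on acyclic inputs (Pre_).

-- ===== PORT A =====
-- graph = defaultdict(list); for src, dst in parents: graph[dst].append(src)  (shared by both ports: both Pythons build the identical adjacency dict)
def pvBuildGraph (parents : List (Int × Int)) : PySem.Dict Int (List Int) :=
  parents.foldl (fun g p => g.modify p.2 [] (fun l => l ++ [p.1])) PySem.Dict.empty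

-- A's while loop over the deque: pop one node, record it as res, append its parents.
-- Fuel is an upper bound on the number of dequeues (the loop exits when the queue
-- empties; under Pre_ the bound is proved sufficient).
def pvBfsA (g : PySem.Dict Int (List Int)) : Nat → List Int → Int → Int
  | _, [], res => res
  | 0, _ :: _, res => res
  | f + 1, node :: q, _ => pvBfsA g f (q ++ g.getD node []) node

def furthest_common_ancestor (parents : List (Int × Int)) (x : Int) : Int :=
  let graph := pvBuildGraph parents
  let _nodes := parents.foldl (fun s p => PySem.Set.add (PySem.Set.add s p.1) p.2) (PySem.Set.ofList [])  -- A builds `nodes`; it is never read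
  pvBfsA graph ((parents.length + 1) ^ (parents.length + 1)) [x] x

-- ===== PORT B =====
-- B's while loop: last = frontier[-1]; frontier = concatenation of graph[node] for node in frontier.
-- Fuel bounds the number of LEVELS; under Pre_ it is proved sufficient.
def pvBfsB (g : PySem.Dict Int (List Int)) : Nat → List Int → Int → Int
  | _, [], last => last
  | 0, _ :: _, last => last
  | d + 1, v :: fr, _ =>
      pvBfsB g d ((v :: fr).flatMap (fun node => g.getD node [])) ((v :: fr).getLastD v)

def furthest_common_ancestor_alt (parents : List (Int × Int)) (x : Int) : Int :=
  let graph := pvBuildGraph parents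
  pvBfsB graph (parents.length + 1) [x] x

-- ===== PRECONDITION & SPEC =====
-- one-step upward neighbours of v: sources of the edges whose destination is v
def pvStep (parents : List (Int × Int)) (v : Int) : List Int :=
  (parents.filter (fun p => p.2 == v)).map Prod.fst

-- one closure step: add every one-step neighbour of every member
def pvGrow (parents : List (Int × Int)) (s : List Int) : List Int :=
  (s ++ s.flatMap (pvStep parents)).dedup

-- Pre_ excludes exactly the inputs on which A's visited-less BFS loops forever:
-- those where some node reachable from x lies on a cycle. (pvGrow^[n+1] is the set
-- of nodes reachable in at most n+1 steps; paths need never be longer than that.)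
def Pre_furthest_common_ancestor (parents : List (Int × Int)) (x : Int) : Prop :=
  ∀ p ∈ parents, p.1 ∈ (pvGrow parents)^[parents.length + 1] [x] →
    p.1 ∉ (pvGrow parents)^[parents.length + 1] (pvStep parents p.1)

instance (parents : List (Int × Int)) (x : Int) : Decidable (Pre_furthest_common_ancestor parents x) := by
  unfold Pre_furthest_common_ancestor; infer_instance

def pvWitness_furthest_common_ancestor : (List (Int × Int)) × Int := ([(1, 2), (2, 3)], 3)

def Spec_furthest_common_ancestor (parents : List (Int × Int)) (x : Int) (out : Int) : Prop := out = furthest_common_ancestor_alt parents x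
instance (parents : List (Int × Int)) (x : Int) (out : Int) : Decidable (Spec_furthest_common_ancestor parents x out) := by unfold Spec_furthest_common_ancestor; infer_instance

-- ===== CLAIM (what is proved, stated in full; the proofs are below) =====
def Claim_equal_furthest_common_ancestor : Prop := ∀ (parents : List (Int × Int)) (x : Int), Dom_furthest_common_ancestor parents x → Pre_furthest_common_ancestor parents x → Spec_furthest_common_ancestor parents x (furthest_common_ancestor parents x)

-- ===== LEMMAS AND PROOFS =====

-- the adjacency list a finished graph hands back for v is exactly pvStep parents v
theorem pvBuildGraph_getD_aux (l : List (Int × Int)) (g : PySem.Dict Int (List Int)) (v : Int) :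
    (l.foldl (fun g p => g.modify p.2 [] (fun l => l ++ [p.1])) g).getD v [] =
      g.getD v [] ++ pvStep l v := by
  induction l generalizing g with
  | nil => simp [pvStep]
  | cons p l ih =>
      simp only [List.foldl_cons, ih, pvStep, List.filter_cons]
      rw [PySem.Dict.getD_modify]
      by_cases h : p.2 = v
      · subst h; simp [pvStep]
      · have hb : (p.2 == v) = false := by simp [h]
        simp [hb, Ne.symm h]

theorem pvBuildGraph_getD (parents : List (Int × Int)) (v : Int) :
    (pvBuildGraph parents).getD v [] = pvStep parents v := by
  simpa using pvBuildGraph_getD_aux parents PySem.Dict.empty v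

theorem pvGetLastD_cons (v r : Int) (fr : List Int) :
    (v :: fr).getLastD r = fr.getLastD v := by
  cases fr with
  | nil => simp
  | cons h t => simp [List.getLastD]

-- frontier expansion (one BFS level)
def pvExp (parents : List (Int × Int)) (fr : List Int) : List Int :=
  fr.flatMap (pvStep parents)

-- fuel A needs to process d levels starting from fr
def pvNeed (parents : List (Int × Int)) : Nat → List Int → Nat
  | 0, _ => 0
  | d + 1, fr => fr.length + pvNeed parents d (pvExp parents fr)

-- the d-th BFS level
def pvIterExp (parents : List (Int × Int)) : Nat → List Int → List Int
  | 0, fr => fr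
  | d + 1, fr => pvIterExp parents d (pvExp parents fr)

-- A's deque loop consumes the current level fr (ahead of pending) and appends its expansion
theorem pvBfsA_level (parents : List (Int × Int)) (fr : List Int) :
    ∀ (pending : List Int) (res : Int) (f : Nat),
      pvBfsA (pvBuildGraph parents) (fr.length + f) (fr ++ pending) res =
        pvBfsA (pvBuildGraph parents) f (pending ++ pvExp parents fr) (fr.getLastD res) := by
  induction fr with
  | nil => simp [pvExp]
  | cons v fr ih =>
      intro pending res f
      have h1 : (v :: fr).length + f = (fr.length + f) + 1 := by simp; omega
      rw [h1]
      show pvBfsA (pvBuildGraph parents) (fr.length + f) ((fr ++ pending) ++ (pvBuildGraph parents).getD v []) v = _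
      rw [pvBuildGraph_getD, List.append_assoc, ih (pending ++ pvStep parents v) v f]
      rw [pvGetLastD_cons]
      simp [pvExp]

theorem pvBfsB_step (parents : List (Int × Int)) (d : Nat) (fr : List Int) (hfr : fr ≠ []) (r : Int) :
    pvBfsB (pvBuildGraph parents) (d + 1) fr r =
      pvBfsB (pvBuildGraph parents) d (pvExp parents fr) (fr.getLastD r) := by
  match fr, hfr with
  | v :: fr, _ =>
      show pvBfsB _ d ((v :: fr).flatMap (fun node => (pvBuildGraph parents).getD node [])) ((v :: fr).getLastD v) = _
      have : (v :: fr).flatMap (fun node => (pvBuildGraph parents).getD node []) = pvExp parents (v :: fr) := by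
        simp [pvExp, pvBuildGraph_getD]
      rw [this, pvGetLastD_cons, pvGetLastD_cons]

-- main simulation: with the levels dying within d steps and enough fuel, A's deque run equals B's level run
theorem pvBfs_agree (parents : List (Int × Int)) (d : Nat) :
    ∀ (fr : List Int) (r : Int) (f : Nat),
      pvIterExp parents d fr = [] → pvNeed parents d fr ≤ f →
      pvBfsA (pvBuildGraph parents) f fr r = pvBfsB (pvBuildGraph parents) d fr r := by
  induction d with
  | zero =>
      intro fr r f hdie _
      have : fr = [] := hdie
      subst this
      cases f <;> rfl
  | succ d ih =>
      intro fr r f hdie hneed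
      by_cases hfr : fr = []
      · subst hfr; cases f <;> rfl
      · have hlen : fr.length + (f - fr.length) = f := by
          have : fr.length ≤ f := by
            have := hneed; unfold pvNeed at this; omega
          omega
        have hstep := pvBfsA_level parents fr [] r (f - fr.length)
        rw [List.append_nil, List.nil_append] at hstep
        rw [← hlen, hstep]
        rw [pvBfsB_step parents d fr hfr r]
        exact ih (pvExp parents fr) (fr.getLastD r) (f - fr.length) hdie
          (by unfold pvNeed at hneed; omega)

-- ---- fuel sufficiency: pvNeed is bounded by (m+1)^d ----

theorem pvStep_length_le (parents : List (Int × Int)) (v : Int) :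
    (pvStep parents v).length ≤ parents.length := by
  simp only [pvStep, List.length_map]
  exact List.length_filter_le _ _

theorem pvExp_length_le (parents : List (Int × Int)) (fr : List Int) :
    (pvExp parents fr).length ≤ fr.length * parents.length := by
  induction fr with
  | nil => simp [pvExp]
  | cons v fr ih =>
      simp only [pvExp, List.flatMap_cons, List.length_append, List.length_cons] at *
      have := pvStep_length_le parents v
      nlinarith

theorem pvNeed_le (parents : List (Int × Int)) (d : Nat) :
    ∀ fr : List Int, pvNeed parents d fr ≤ fr.length * (parents.length + 1) ^ d := by
  induction d with
  | zero => intro fr; simp [pvNeed]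
  | succ d ih =>
      intro fr
      have h1 := ih (pvExp parents fr)
      have h2 := pvExp_length_le parents fr
      have h3 : (1 : Nat) ≤ (parents.length + 1) ^ d := Nat.one_le_pow _ _ (by omega)
      unfold pvNeed
      have : (pvExp parents fr).length * (parents.length + 1) ^ d ≤
          fr.length * parents.length * (parents.length + 1) ^ d :=
        Nat.mul_le_mul_right _ h2
      have h4 : fr.length * (parents.length + 1) ^ (d + 1) =
          fr.length * (parents.length + 1) ^ d +
            fr.length * parents.length * (parents.length + 1) ^ d := by ring
      have h5 : fr.length ≤ fr.length * (parents.length + 1) ^ d :=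
        le_trans (by omega) (Nat.mul_le_mul_left fr.length h3)
      omega
  
-- ---- level death: under Pre_, the (m+1)-st level from [x] is empty ----

-- chains for the step relation
theorem pvChain_mem_srcs (parents : List (Int × Int)) :
    ∀ (l : List Int) (u : Int), List.IsChain (fun a b => b ∈ pvStep parents a) (u :: l) →
      ∀ w ∈ l, w ∈ parents.map Prod.fst := by
  intro l
  induction l with
  | nil => intro u _ w hw; cases hw
  | cons v l ih =>
      intro u hch w hw
      rcases List.isChain_cons_cons.mp hch with ⟨hv, hch'⟩
      rcases List.mem_cons.mp hw with hw | hw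
      · subst hw
        simp only [pvStep, List.mem_map] at hv
        rcases hv with ⟨p, hp, hpv⟩
        exact List.mem_map.mpr ⟨p, List.mem_of_mem_filter hp, hpv⟩
      · exact ih v hch' w hw

-- membership in a level yields a chain from some frontier element
theorem pvIterExp_chain (parents : List (Int × Int)) (k : Nat) :
    ∀ (fr : List Int) (v : Int), v ∈ pvIterExp parents k fr →
      ∃ u ∈ fr, ∃ l : List Int, List.IsChain (fun a b => b ∈ pvStep parents a) (u :: l) ∧
        l.length = k ∧ l.getLastD u = v := by
  induction k with
  | zero =>
      intro fr v hv
      exact ⟨v, hv, [], List.IsChain.singleton v, rfl, rfl⟩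
  | succ k ih =>
      intro fr v hv
      rcases ih (pvExp parents fr) v hv with ⟨u', hu', l, hch, hlen, hlast⟩
      rcases List.mem_flatMap.mp hu' with ⟨u, hu, hstep⟩
      exact ⟨u, hu, u' :: l, List.IsChain.cons_cons hstep hch, by simp [hlen],
        by rw [pvGetLastD_cons]; exact hlast⟩

-- closure basics
theorem pvGrow_subset (parents : List (Int × Int)) (s : List Int) : s ⊆ pvGrow parents s := by
  intro a ha
  simp only [pvGrow, List.mem_dedup, List.mem_append]
  exact Or.inl ha

theorem pvGrow_step_mem (parents : List (Int × Int)) {s : List Int} {u w : Int}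
    (hu : u ∈ s) (hw : w ∈ pvStep parents u) : w ∈ pvGrow parents s := by
  simp only [pvGrow, List.mem_dedup, List.mem_append, List.mem_flatMap]
  exact Or.inr ⟨u, hu, hw⟩

theorem pvIterGrow_subset (parents : List (Int × Int)) (k : Nat) (s : List Int) :
    s ⊆ (pvGrow parents)^[k] s := by
  induction k generalizing s with
  | zero => simp
  | succ k ih =>
      rw [Function.iterate_succ_apply]
      exact fun a ha => ih (pvGrow parents s) (pvGrow_subset parents s ha)

-- a chain of length ≤ k from a member of s ends inside grow^[k] s
theorem pvChain_mem_iterGrow (parents : List (Int × Int)) :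
    ∀ (l : List Int) (u : Int) (s : List Int) (k : Nat),
      List.IsChain (fun a b => b ∈ pvStep parents a) (u :: l) → u ∈ s → l.length ≤ k →
      l.getLastD u ∈ (pvGrow parents)^[k] s := by
  intro l
  induction l with
  | nil => intro u s k _ hu _; exact pvIterGrow_subset parents k s hu
  | cons w l ih =>
      intro u s k hch hu hk
      rcases List.isChain_cons_cons.mp hch with ⟨hw, hch'⟩
      obtain ⟨k', rfl⟩ : ∃ k', k = k' + 1 := ⟨k - 1, by simp at hk; omega⟩
      rw [Function.iterate_succ_apply]
      have hwin : w ∈ pvGrow parents s := pvGrow_step_mem parents hu hw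
      have := ih w (pvGrow parents s) k' hch' hwin (by simpa using hk)
      rwa [pvGetLastD_cons]

-- pigeonhole: a list of srcs longer than parents has a duplicate
theorem pvList_dup (parents : List (Int × Int)) (l : List Int)
    (hsub : ∀ w ∈ l, w ∈ parents.map Prod.fst) (hlen : parents.length < l.length) :
    ∃ a, List.Sublist [a, a] l := by
  by_cases hnd : l.Nodup
  · exfalso
    have h1 : l.toFinset.card = l.length := List.toFinset_card_of_nodup hnd
    have h2 : l.toFinset ⊆ (parents.map Prod.fst).toFinset := by
      intro a ha
      simp only [List.mem_toFinset] at *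
      exact hsub a ha
    have h3 : (parents.map Prod.fst).toFinset.card ≤ (parents.map Prod.fst).length :=
      List.toFinset_card_le _
    have := Finset.card_le_card h2
    simp only [List.length_map] at h3
    omega
  · rcases List.exists_duplicate_iff_not_nodup.mpr hnd with ⟨a, ha⟩
    exact ⟨a, List.duplicate_iff_sublist.mp ha⟩

theorem pvSublist_split {a : Int} {l : List Int} (h : List.Sublist [a, a] l) :
    ∃ s t u : List Int, l = s ++ a :: t ++ a :: u := by
  rcases List.cons_sublist_iff.mp h with ⟨s', t', hl, ha1, h1⟩
  rcases List.cons_sublist_iff.mp h1 with ⟨s2, t2, ht', ha2, _⟩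
  rcases List.append_of_mem ha1 with ⟨u1, v1, rfl⟩
  rcases List.append_of_mem ha2 with ⟨u2, v2, rfl⟩
  exact ⟨u1, v1 ++ u2, v2 ++ t2, by simp [hl, ht']⟩

-- under Pre_, level m+1 from [x] is empty
theorem pvLevels_die (parents : List (Int × Int)) (x : Int)
    (hpre : Pre_furthest_common_ancestor parents x) :
    pvIterExp parents (parents.length + 1) [x] = [] := by
  by_contra hne
  rcases List.exists_mem_of_ne_nil _ hne with ⟨v, hv⟩
  rcases pvIterExp_chain parents (parents.length + 1) [x] v hv with ⟨u, hu, l, hch, hlen, _⟩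
  obtain rfl : u = x := List.mem_singleton.mp hu
  have hsub := pvChain_mem_srcs parents l u hch
  rcases pvList_dup parents l hsub (by omega) with ⟨a, hdup⟩
  rcases pvSublist_split hdup with ⟨s, t, w, rfl⟩
  -- a is a source
  have hasrc : a ∈ parents.map Prod.fst := hsub a (by simp)
  rcases List.mem_map.mp hasrc with ⟨p, hp, hpa⟩
  -- split the chain at the first a
  rw [show u :: (s ++ a :: t ++ a :: w) = (u :: s) ++ a :: (t ++ a :: w) by simp] at hch
  rcases List.isChain_split.mp hch with ⟨hch1, hch2⟩
  -- reach: a ∈ grow^[m+1] [x]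
  have hreach : a ∈ (pvGrow parents)^[parents.length + 1] [u] := by
    have h := pvChain_mem_iterGrow parents (s ++ [a]) u [u] (parents.length + 1)
      (by simpa using hch1) (by simp) (by simp at hlen ⊢; omega)
    simpa [List.getLastD_concat] using h
  -- cycle: a ∈ grow^[m+1] (pvStep parents a)
  have hcyc : a ∈ (pvGrow parents)^[parents.length + 1] (pvStep parents a) := by
    rw [show a :: (t ++ a :: w) = (a :: t) ++ a :: w by simp] at hch2
    rcases List.isChain_split.mp hch2 with ⟨hch3, _⟩
    -- hch3 : IsChain ((a :: t) ++ [a])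
    cases t with
    | nil =>
        exact pvIterGrow_subset parents _ _ (by simpa using hch3)
    | cons b t =>
        obtain ⟨hb, hch4⟩ : b ∈ pvStep parents a ∧
          List.IsChain (fun a b => b ∈ pvStep parents a) (b :: (t ++ [a])) := by simpa using hch3
        have h := pvChain_mem_iterGrow parents (t ++ [a]) b (pvStep parents a)
          (parents.length + 1) hch4 hb (by simp at hlen ⊢; omega)
        simpa [List.getLastD_concat] using h
  exact (hpre p hp (hpa ▸ hreach)) (hpa ▸ hcyc)

-- ===== VERDICT (by name: the statement is the Claim_ definition above) =====
theorem furthest_common_ancestor_spec : Claim_equal_furthest_common_ancestor := by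
  intro parents x _ hpre
  unfold Spec_furthest_common_ancestor furthest_common_ancestor furthest_common_ancestor_alt
  simp only []
  exact pvBfs_agree parents (parents.length + 1) [x] x _
    (pvLevels_die parents x hpre)
    (le_trans (pvNeed_le parents (parents.length + 1) [x]) (by simp))
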